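-- pv_equiv track=rewrite | github.com/jaewan/Genie | djinn/frontend/core/shape_inference.py | _cat_shape
-- ===== SOURCE A (Python) =====
-- from typing import Optional, Tuple, List, Union, Any
--
-- def _cat_shape(shapes: List[Tuple], dim: int) -> Optional[Tuple]:
--     """Compute shape after concatenation."""
--     if not shapes:
--         return None
--     # All shapes must match except on concat dimension
--     shape_list = list(shapes[0])
--     for shape in shapes[1:]:
--         if len(shape) != len(shape_list):
--             return None  # Incompatible ranks
--         for i, (s1, s2) in enumerate(zip(shape_list, shape)):
--             if i == dim:
--                 shape_list[i] += s2
--             elif s1 != s2: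
--                 return None  # Incompatible shapes
--     return tuple(shape_list)
-- ===== SOURCE B (Python) =====
-- def _cat_shape(shapes, dim):
--     """Compute shape after concatenation (column-wise: rank check, then per-axis columns)."""
--     if not shapes:
--         return None
--     first, rest = shapes[0], shapes[1:]
--     if any(len(s) != len(first) for s in rest):
--         return None
--     out = []
--     for i, col in enumerate(zip(*shapes)):
--         v = col[0]
--         if i == dim:
--             v += sum(col[1:])
--         elif any(c != col[0] for c in col[1:]):
--             return None
--         out.append(v)
--     return tuple(out)
-- ===== Notes on version B (the rewrite author's own statement) =====
-- stated objective: alternative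
-- what changed: B validates all ranks up front and then works column-wise over zip(*shapes) (summing the concat axis's column, checking equality on the others), instead of A's row-wise loop that mutates a running shape list per input shape.
import Mathlib
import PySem

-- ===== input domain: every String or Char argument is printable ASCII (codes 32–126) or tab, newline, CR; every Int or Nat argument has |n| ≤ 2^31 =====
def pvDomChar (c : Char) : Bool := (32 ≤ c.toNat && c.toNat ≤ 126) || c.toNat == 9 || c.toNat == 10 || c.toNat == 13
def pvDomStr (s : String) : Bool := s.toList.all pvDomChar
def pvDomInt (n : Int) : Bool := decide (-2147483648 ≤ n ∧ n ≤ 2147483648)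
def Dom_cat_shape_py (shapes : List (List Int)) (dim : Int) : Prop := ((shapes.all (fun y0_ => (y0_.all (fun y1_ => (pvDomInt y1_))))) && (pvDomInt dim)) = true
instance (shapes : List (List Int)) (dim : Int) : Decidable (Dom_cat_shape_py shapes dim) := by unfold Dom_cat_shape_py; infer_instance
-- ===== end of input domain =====

-- B recomputes the concatenation shape column-wise (rank check first, then one pass per axis
-- over the column of that axis's sizes) instead of A's row-wise accumulation; objective: alternative decomposition.

-- ===== PORT A =====
-- inner loop of A: 'for i, (s1, s2) in enumerate(zip(shape_list, shape))', rebuilding shape_list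
def catAInner (dim : Int) : Nat → List (Int × Int) → Option (List Int)
  | _, [] => some []
  | i, (s1, s2) :: rest =>
    if (i : Int) = dim then
      match catAInner dim (i+1) rest with
      | none => none
      | some t => some ((s1 + s2) :: t)
    else if s1 ≠ s2 then none
    else
      match catAInner dim (i+1) rest with
      | none => none
      | some t => some (s1 :: t)

-- outer loop of A: 'for shape in shapes[1:]'
def catAOuter (dim : Int) : List (List Int) → List Int → Option (List Int)
  | [], sl => some sl
  | shape :: rest, sl =>
    if shape.length ≠ sl.length then none
    else
      match catAInner dim 0 (sl.zip shape) with
      | none => none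
      | some sl' => catAOuter dim rest sl'

def cat_shape_py (shapes : List (List Int)) (dim : Int) : Option (List Int) :=
  match shapes with
  | [] => none
  | s0 :: rest => catAOuter dim rest s0

-- ===== PORT B =====
-- B's column loop 'for i, col in enumerate(zip(*shapes))': peel the head of every row at once
-- (headD 0 is safe: the rank check guarantees every row is as long as 'first').
def catBCols (dim : Int) : Nat → List Int → List (List Int) → Option (List Int)
  | _, [], _ => some []
  | i, f :: fs, rest =>
    let heads := rest.map (fun s => s.headD 0)
    let tails := rest.map (fun s => s.tail)
    if (i : Int) = dim then
      match catBCols dim (i+1) fs tails with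
      | none => none
      | some t => some ((f + heads.foldl (· + ·) 0) :: t)
    else if heads.any (fun c => c ≠ f) then none
    else
      match catBCols dim (i+1) fs tails with
      | none => none
      | some t => some (f :: t)

def cat_shape_py_alt (shapes : List (List Int)) (dim : Int) : Option (List Int) :=
  match shapes with
  | [] => none
  | first :: rest =>
    if rest.any (fun s => s.length ≠ first.length) then none
    else catBCols dim 0 first rest

-- ===== PRECONDITION & SPEC =====
def Spec_cat_shape_py (shapes : List (List Int)) (dim : Int) (out : Option (List Int)) : Prop := out = cat_shape_py_alt shapes dim
instance (shapes : List (List Int)) (dim : Int) (out : Option (List Int)) : Decidable (Spec_cat_shape_py shapes dim out) := by unfold Spec_cat_shape_py; infer_instance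

-- ===== CLAIM (what is proved, stated in full; the proofs are below) =====
def Claim_equal_cat_shape_py : Prop := ∀ (shapes : List (List Int)) (dim : Int), Dom_cat_shape_py shapes dim → Spec_cat_shape_py shapes dim (cat_shape_py shapes dim)

-- ===== LEMMAS AND PROOFS =====

-- A's inner pass preserves the number of axes it walks over
theorem catAInner_length (dim : Int) : ∀ (i : Nat) (ps : List (Int × Int)) (r : List Int),
    catAInner dim i ps = some r → r.length = ps.length := by
  intro i ps
  induction ps generalizing i with
  | nil =>
    intro r h
    cases Option.some.inj h
    rfl
  | cons p rest ih =>
    intro r h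
    obtain ⟨s1, s2⟩ := p
    simp only [catAInner] at h
    split_ifs at h with h1 h2   -- the s1 ≠ s2 branch is closed by split_ifs itself
    · cases hr : catAInner dim (i+1) rest with
      | none => rw [hr] at h; simp at h
      | some t => rw [hr] at h; simp at h; subst h; simp [ih (i+1) t hr]
    · cases hr : catAInner dim (i+1) rest with
      | none => rw [hr] at h; simp at h
      | some t => rw [hr] at h; simp at h; subst h; simp [ih (i+1) t hr]

theorem foldl_add_acc : ∀ (hs : List Int) (a : Int), hs.foldl (· + ·) a = a + hs.foldl (· + ·) 0 := by
  intro hs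
  induction hs with
  | nil => intro a; simp
  | cons h t ih => intro a; simp only [List.foldl]; rw [ih (a + h), ih (0 + h)]; ring

-- with no other rows, B's column loop returns the first shape unchanged
theorem catBCols_nil (dim : Int) : ∀ (i : Nat) (sl : List Int), catBCols dim i sl [] = some sl := by
  intro i sl
  induction sl generalizing i with
  | nil => simp [catBCols]
  | cons f fs ih => simp [catBCols, ih]

-- absorbing one row: B's column loop over (s :: rest) = A's inner pass over s, then B on the result
theorem catBCols_step (dim : Int) : ∀ (sl s : List Int) (rest : List (List Int)) (i : Nat),
    s.length = sl.length →
    catBCols dim i sl (s :: rest) =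
      match catAInner dim i (sl.zip s) with
      | none => none
      | some sl' => catBCols dim i sl' rest := by
  intro sl
  induction sl with
  | nil =>
    intro s rest i hlen
    have : s = [] := List.eq_nil_of_length_eq_zero (by simpa using hlen)
    subst this
    simp [catBCols, catAInner]
  | cons f fs ih =>
    intro s rest i hlen
    cases s with
    | nil => simp at hlen
    | cons x xs =>
      have hxl : xs.length = fs.length := by simpa using hlen
      simp only [catBCols, List.zip_cons_cons, catAInner, List.map_cons, List.headD_cons,
        List.tail_cons, List.any_cons]
      rw [ih xs (rest.map (fun s => s.tail)) (i+1) hxl]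
      cases hA : catAInner dim (i+1) (fs.zip xs) with
      | none =>
        by_cases hd : (i : Int) = dim
        · simp [hd]
        · simp only [if_neg hd]
          split_ifs <;> rfl
      | some t =>
        by_cases hd : (i : Int) = dim
        · simp only [if_pos hd]
          cases hB : catBCols dim (i+1) t (rest.map (fun s => s.tail)) with
          | none => simp [catBCols, hd, hB]
          | some u =>
            simp only [catBCols, if_pos hd, hB, List.foldl_cons]
            rw [foldl_add_acc _ (0 + x)]
            congr 2
            ring
        · simp only [if_neg hd]
          by_cases hfx : f = x
          · subst hfx
            rw [if_neg (by simp : ¬ f ≠ f)]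
            by_cases hany : ((rest.map (fun s => s.headD 0)).any (fun c => c ≠ f)) = true
            · rw [if_pos (by rw [Bool.or_eq_true]; exact Or.inr hany)]
              have : catBCols dim i (f :: t) rest = none := by
                simp only [catBCols]
                rw [if_neg hd, if_pos hany]
              exact this.symm
            · have hcond : ¬ ((decide (f ≠ f) || (rest.map (fun s => s.headD 0)).any
                    (fun c => c ≠ f)) = true) := by
                rw [Bool.or_eq_true]
                rintro (hc | hc)
                · simp at hc
                · exact hany hc
              rw [if_neg hcond]
              have : catBCols dim i (f :: t) rest
                  = match catBCols dim (i+1) t (rest.map (fun s => s.tail)) with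
                    | none => none
                    | some u => some (f :: u) := by
                simp only [catBCols]
                rw [if_neg hd, if_neg hany]
              exact this.symm
          · rw [if_pos hfx]
            rw [if_pos (by simp; exact Or.inl (fun h => hfx h.symm))]

-- if some later row has a different rank, A necessarily returns none
theorem catAOuter_bad (dim : Int) : ∀ (rest : List (List Int)) (sl : List Int),
    (∃ s ∈ rest, s.length ≠ sl.length) → catAOuter dim rest sl = none := by
  intro rest
  induction rest with
  | nil => intro sl h; simp at h
  | cons s rest' ih =>
    intro sl h
    by_cases hl : s.length ≠ sl.length
    · simp only [catAOuter]
      rw [if_pos hl]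
    · simp only [catAOuter]
      rw [if_neg hl]
      cases hA : catAInner dim 0 (sl.zip s) with
      | none => rfl
      | some sl' =>
        have hlen : sl'.length = sl.length := by
          have h2 := catAInner_length dim 0 (sl.zip s) sl' hA
          have h3 : s.length = sl.length := by omega
          simpa [List.length_zip, h3] using h2
        apply ih
        rcases h with ⟨t, ht, hne⟩
        rcases List.mem_cons.mp ht with h1 | h1
        · exact absurd (by omega : s.length = sl.length) (h1 ▸ hne)
        · exact ⟨t, h1, by rw [hlen]; exact hne⟩

-- when every row has the right rank, A's row-wise loop equals B's column-wise loop
theorem catAOuter_good (dim : Int) : ∀ (rest : List (List Int)) (sl : List Int),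
    (∀ s ∈ rest, s.length = sl.length) → catAOuter dim rest sl = catBCols dim 0 sl rest := by
  intro rest
  induction rest with
  | nil => intro sl _; simp [catAOuter, catBCols_nil]
  | cons s rest' ih =>
    intro sl h
    have hs : s.length = sl.length := h s (by simp)
    simp only [catAOuter]
    rw [if_neg (by omega)]
    rw [catBCols_step dim sl s rest' 0 hs]
    cases hA : catAInner dim 0 (sl.zip s) with
    | none => rfl
    | some sl' =>
      have hlen : sl'.length = sl.length := by
        have h2 := catAInner_length dim 0 (sl.zip s) sl' hA
        simpa [List.length_zip, hs] using h2
      exact ih sl' (fun t ht => (h t (by simp [ht])).trans hlen.symm)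

-- ===== VERDICT (by name: the statement is the Claim_ definition above) =====
theorem cat_shape_py_spec : Claim_equal_cat_shape_py := by
  intro shapes dim _
  unfold Spec_cat_shape_py
  cases shapes with
  | nil => rfl
  | cons first rest =>
    simp only [cat_shape_py, cat_shape_py_alt]
    by_cases hb : rest.any (fun s => s.length ≠ first.length) = true
    · rw [if_pos hb]
      apply catAOuter_bad
      simpa using hb
    · rw [if_neg hb]
      apply catAOuter_good
      intro s hs
      by_contra hne
      exact hb (by simp only [List.any_eq_true]; exact ⟨s, hs, by simpa using hne⟩)
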